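-- pv_equiv track=rewrite | github.com/mixtoism/katas | duplicate_encoder/duplicate_encoder.py | duplicate_encoder
-- ===== SOURCE A (Python) =====
-- def duplicate_encoder(text_to_encode: str):
--     encoder_dict = {}
--     text_to_encode = text_to_encode.lower()
--     for letter in text_to_encode:
--         if encoder_dict.get(letter):
--             encoder_dict[letter] = ")"
--         else:
--             encoder_dict[letter] = "("
--
--     return "".join([encoder_dict[letter] for letter in text_to_encode])
-- ===== SOURCE B (Python) =====
-- def duplicate_encoder(text_to_encode: str):
--     t = text_to_encode.lower()
--     return "".join(
--         ")" if ch in t[:i] or ch in t[i + 1:] else "("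
--         for i, ch in enumerate(t)
--     )
-- ===== Notes on version B (the rewrite author's own statement) =====
-- stated objective: alternative
-- what changed: B drops A's first-vs-repeat dictionary state machine entirely: for each position i it decides repeated-vs-unique by membership of the character in the rest of the string (the prefix t[:i] or the suffix t[i+1:]), maintaining no table or count at all.
import Mathlib
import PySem

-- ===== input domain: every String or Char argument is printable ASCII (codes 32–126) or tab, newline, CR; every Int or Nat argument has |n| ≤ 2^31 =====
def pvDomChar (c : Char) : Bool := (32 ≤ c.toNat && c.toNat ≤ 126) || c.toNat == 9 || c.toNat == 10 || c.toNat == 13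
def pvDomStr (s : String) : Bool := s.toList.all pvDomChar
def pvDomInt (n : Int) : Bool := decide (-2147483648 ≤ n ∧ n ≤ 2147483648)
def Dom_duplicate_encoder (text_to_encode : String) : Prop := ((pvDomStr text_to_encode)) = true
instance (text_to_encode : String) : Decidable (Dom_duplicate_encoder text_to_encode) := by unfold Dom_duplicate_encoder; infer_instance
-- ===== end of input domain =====

-- B replaces A's dictionary state machine with a per-position slice-membership test (ch in t[:i] or t[i+1:]) — alternative algorithm, not faster.


-- ===== PORT A =====
-- one step of A's loop body: `if encoder_dict.get(letter): d[letter] = ")" else: d[letter] = "("`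
-- (Python truthiness of the Optional[str]: None and "" are falsy — `getD "" ≠ ""` captures both)
def dupA_step (d : PySem.Dict Char String) (letter : Char) : PySem.Dict Char String :=
  if (d.get? letter).getD "" ≠ "" then d.insert letter ")" else d.insert letter "("

def duplicate_encoder (text_to_encode : String) : String :=
  let text := PySem.Str.lower text_to_encode
  let encoder_dict := text.toList.foldl dupA_step PySem.Dict.empty
  -- "".join([encoder_dict[letter] for letter in text]); KeyError cannot occur (every
  -- letter of text was inserted by the loop), so dict[letter] is get? with default ""
  String.mk (PySem.Chars.join []
    (text.toList.map (fun letter => ((encoder_dict.get? letter).getD "").toList)))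

-- ===== PORT B =====
def duplicate_encoder_alt (text_to_encode : String) : String :=
  let t := PySem.Str.lower text_to_encode
  -- "".join(")" if ch in t[:i] or ch in t[i+1:] else "(" for i, ch in enumerate(t))
  String.mk (PySem.Chars.join []
    ((PySem.List.enumerate t.toList 0).map (fun p =>
      if PySem.Chars.isIn [p.2] (PySem.List.slice t.toList none (some p.1)) ||
         PySem.Chars.isIn [p.2] (PySem.List.slice t.toList (some (p.1 + 1)) none)
      then ")".toList else "(".toList)))

-- ===== PRECONDITION & SPEC =====
def Spec_duplicate_encoder (text_to_encode : String) (out : String) : Prop := out = duplicate_encoder_alt text_to_encode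
instance (text_to_encode : String) (out : String) : Decidable (Spec_duplicate_encoder text_to_encode out) := by unfold Spec_duplicate_encoder; infer_instance

-- ===== CLAIM (what is proved, stated in full; the proofs are below) =====
def Claim_equal_duplicate_encoder : Prop := ∀ (text_to_encode : String), Dom_duplicate_encoder text_to_encode → Spec_duplicate_encoder text_to_encode (duplicate_encoder text_to_encode)

-- ===== LEMMAS AND PROOFS =====

-- each loop step of A inserts the letter, with the piece chosen by the truthiness test
theorem dupA_step_eq (d : PySem.Dict Char String) (x : Char) :
    dupA_step d x = d.insert x (if (d.get? x).getD "" ≠ "" then ")" else "(") := by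
  unfold dupA_step; split_ifs <;> rfl

-- characterisation of A's dictionary after the whole loop: "(" for unique letters, ")" for repeated ones
theorem dupA_dict_get (l : List Char) (c : Char) :
    ((l.foldl dupA_step PySem.Dict.empty).get? c) =
      if l.count c = 0 then none else if l.count c = 1 then some "(" else some ")" := by
  induction l using List.reverseRecOn with
  | nil => simp [PySem.Dict.get?_empty]
  | append_singleton t x ih =>
    rw [List.foldl_append, List.foldl_cons, List.foldl_nil, dupA_step_eq]
    by_cases hcx : c = x
    · subst hcx
      rw [PySem.Dict.get?_insert_self, ih, List.count_append]
      simp only [List.count_cons_self, List.count_nil]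
      by_cases h0 : t.count c = 0
      · simp [h0]
      · by_cases h1 : t.count c = 1
        · simp [h1]
        · rw [if_neg h0, if_neg h1]
          simp only [Option.getD_some, ne_eq]
          rw [if_pos (by decide), if_neg (by omega), if_neg (by omega)]
    · rw [PySem.Dict.get?_insert_of_ne _ _ hcx, ih, List.count_append]
      have hx0 : List.count c [x] = 0 := by
        simp only [List.count_singleton]
        simp only [beq_iff_eq]
        exact if_neg (fun h => hcx h.symm)
      rw [hx0, Nat.add_zero]

-- a single-character needle is an infix iff the character occurs ('ch in t[:i]' is membership)
theorem dup_singleton_infix_iff (c : Char) (s : List Char) : [c] <:+: s ↔ c ∈ s := by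
  constructor
  · intro h; exact h.sublist.subset (by simp)
  · intro h; obtain ⟨p, q, hpq⟩ := List.append_of_mem h; exact ⟨p, q, by simp [hpq]⟩

-- B's test at position k (element c = l[k]): c occurs in the prefix or the suffix iff it occurs more than once in l
theorem dup_elsewhere_iff (l : List Char) (k : Nat) (hk : k < l.length) (c : Char)
    (hc : l[k] = c) :
    (c ∈ l.take k ∨ c ∈ l.drop (k + 1)) ↔ 1 < l.count c := by
  have hsplit : l = l.take k ++ c :: l.drop (k + 1) := by
    conv_lhs => rw [← List.take_append_drop k l]
    rw [List.drop_eq_getElem_cons hk, hc]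
  have hcount : l.count c = (l.take k).count c + (1 + (l.drop (k + 1)).count c) := by
    conv_lhs => rw [hsplit]
    rw [List.count_append, List.count_cons_self]
    omega
  rw [hcount]
  constructor
  · rintro (h | h)
    · have := List.one_le_count_iff.mpr h; omega
    · have := List.one_le_count_iff.mpr h; omega
  · intro h
    by_contra hcon
    push_neg at hcon
    have h1 : (l.take k).count c = 0 := List.count_eq_zero.mpr hcon.1
    have h2 : (l.drop (k + 1)).count c = 0 := List.count_eq_zero.mpr hcon.2
    omega

-- ===== VERDICT (by name: the statement is the Claim_ definition above) =====
theorem duplicate_encoder_spec : Claim_equal_duplicate_encoder := by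
  intro s _
  unfold Spec_duplicate_encoder duplicate_encoder duplicate_encoder_alt
  refine congrArg String.mk (congrArg (PySem.Chars.join []) ?_)
  set l := (PySem.Str.lower s).toList with hl
  apply List.ext_getElem
  · simp [PySem.List.length_enumerate]
  · intro k hk hk'
    have hkl : k < l.length := by simpa using hk
    rw [List.getElem_map, List.getElem_map, PySem.List.getElem_enumerate]
    simp only [Int.zero_add]
    have hslice1 : PySem.List.slice l none (some (k : Int)) = l.take k := by
      simpa using PySem.List.slice_to l (b := (k : Int)) (by positivity)
    have hslice2 : PySem.List.slice l (some ((k : Int) + 1)) none = l.drop (k + 1) := by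
      have h := PySem.List.slice_from l (a := (k : Int) + 1) (by positivity)
      have : ((k : Int) + 1).toNat = k + 1 := by omega
      rw [h, this]
    rw [hslice1, hslice2]
    have hmem1 : (PySem.Chars.isIn [l[k]] (l.take k) = true) ↔ l[k] ∈ l.take k := by
      rw [PySem.Chars.isIn_iff_infix]; exact dup_singleton_infix_iff _ _
    have hmem2 : (PySem.Chars.isIn [l[k]] (l.drop (k + 1)) = true) ↔ l[k] ∈ l.drop (k + 1) := by
      rw [PySem.Chars.isIn_iff_infix]; exact dup_singleton_infix_iff _ _
    rw [dupA_dict_get]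
    have hc1 : 1 ≤ l.count l[k] := List.one_le_count_iff.mpr (l.getElem_mem hkl)
    by_cases hdup : 1 < l.count l[k]
    · rw [if_neg (by omega), if_neg (by omega)]
      have := (dup_elsewhere_iff l k hkl l[k] rfl).mpr hdup
      rcases this with h | h
      · rw [if_pos (by simp [hmem1.mpr h])]; rfl
      · rw [if_pos (by simp [hmem2.mpr h])]; rfl
    · have hone : l.count l[k] = 1 := by omega
      rw [if_neg (by omega), if_pos hone]
      have hno := (dup_elsewhere_iff l k hkl l[k] rfl).not.mpr (by omega)
      push_neg at hno
      rw [if_neg (by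
        simp only [Bool.or_eq_true, hmem1, hmem2]
        rintro (h | h)
        · exact hno.1 h
        · exact hno.2 h)]
      rfl
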